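-- pv_equiv track=rewrite | github.com/WHCanRC-Media/BookofPraise | png2ly/render_ly.py | _parse_abs_pitch
-- ===== SOURCE A (Python) =====
-- NOTE_NAME_TO_PC = {'c': 0, 'd': 1, 'e': 2, 'f': 3, 'g': 4, 'a': 5, 'b': 6}
--
-- def _parse_abs_pitch(s):
--     """Parse a LilyPond pitch like c', gis, bes'' into (pc, octave)."""
--     if not s or s[0] not in NOTE_NAME_TO_PC:
--         return None
--     pc = NOTE_NAME_TO_PC[s[0]]
--     rest = s[1:]
--     # Strip accidentals
--     for acc in ("isis", "eses", "is", "es"):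
--         if rest.startswith(acc):
--             rest = rest[len(acc):]
--             break
--     ups = rest.count("'")
--     downs = rest.count(",")
--     return (pc, ups - downs)
-- ===== SOURCE B (Python) =====
-- NOTE_NAME_TO_PC = {'c': 0, 'd': 1, 'e': 2, 'f': 3, 'g': 4, 'a': 5, 'b': 6}
--
-- def _parse_abs_pitch(s):
--     """Parse a LilyPond pitch like c', gis, bes'' into (pc, octave)."""
--     if not s:
--         return None
--     pc = NOTE_NAME_TO_PC.get(s[0])
--     if pc is None:
--         return None
--     # The note letter and any accidental spelling (is/es/isis/eses) contain no
--     # octave marks, so counting ' and , over the WHOLE string is equivalent to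
--     # stripping them first: no accidental-prefix parsing is needed at all.
--     return (pc, s.count("'") - s.count(","))
-- ===== Notes on version B (the rewrite author's own statement) =====
-- stated objective: simpler
-- what changed: B deletes A's accidental-stripping loop entirely and counts ' and , over the whole string in one expression, which is correct because the note letter and every accidental spelling contain no octave-mark characters.
import Mathlib
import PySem

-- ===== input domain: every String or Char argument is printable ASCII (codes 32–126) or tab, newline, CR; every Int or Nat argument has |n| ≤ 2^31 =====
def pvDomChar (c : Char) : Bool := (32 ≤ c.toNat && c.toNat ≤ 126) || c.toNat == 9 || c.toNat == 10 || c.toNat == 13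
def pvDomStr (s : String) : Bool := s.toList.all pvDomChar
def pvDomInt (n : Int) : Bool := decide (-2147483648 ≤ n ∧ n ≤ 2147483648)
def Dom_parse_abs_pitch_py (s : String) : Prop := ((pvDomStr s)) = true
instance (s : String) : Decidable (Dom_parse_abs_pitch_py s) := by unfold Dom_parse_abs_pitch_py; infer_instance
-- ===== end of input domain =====

-- B deletes A's accidental-stripping loop and counts octave marks over the whole
-- string (legal because note letters and accidental spellings contain none); objective: simpler.

-- ===== PORT A =====
-- NOTE_NAME_TO_PC
def noteDict : PySem.Dict Char Int :=
  PySem.Dict.ofList [('c', 0), ('d', 1), ('e', 2), ('f', 3), ('g', 4), ('a', 5), ('b', 6)]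

-- the 'for acc in (...): if rest.startswith(acc): rest = rest[len(acc):]; break' loop
def stripAccA (rest : List Char) : List (List Char) → List Char
  | [] => rest
  | acc :: accs =>
    if acc.isPrefixOf rest then rest.drop acc.length else stripAccA rest accs

def parse_abs_pitch_py (s : String) : Option (Int × Int) :=
  match s.toList with
  | [] => none                                   -- not s
  | c0 :: rest0 =>
    match noteDict.get? c0 with                   -- s[0] not in NOTE_NAME_TO_PC / NOTE_NAME_TO_PC[s[0]]
    | none => none
    | some pc =>
      let rest := stripAccA rest0 [['i','s','i','s'], ['e','s','e','s'], ['i','s'], ['e','s']]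
      let ups : Int := rest.count '\''            -- rest.count("'") (single-char substring)
      let downs : Int := rest.count ','           -- rest.count(",")
      some (pc, ups - downs)

-- ===== PORT B =====
def parse_abs_pitch_py_alt (s : String) : Option (Int × Int) :=
  match s.toList with
  | [] => none                                   -- not s
  | c0 :: _ =>
    match noteDict.get? c0 with                   -- NOTE_NAME_TO_PC.get(s[0]) / is None
    | none => none
    | some pc =>
      -- s.count("'") - s.count(",") over the WHOLE string (single-char substring count)
      some (pc, (s.toList.count '\'' : Int) - (s.toList.count ',' : Int))

-- ===== PRECONDITION & SPEC =====
def Spec_parse_abs_pitch_py (s : String) (out : Option (Int × Int)) : Prop := out = parse_abs_pitch_py_alt s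
instance (s : String) (out : Option (Int × Int)) : Decidable (Spec_parse_abs_pitch_py s out) := by unfold Spec_parse_abs_pitch_py; infer_instance

-- ===== CLAIM (what is proved, stated in full; the proofs are below) =====
def Claim_equal_parse_abs_pitch_py : Prop := ∀ (s : String), Dom_parse_abs_pitch_py s → Spec_parse_abs_pitch_py s (parse_abs_pitch_py s)

-- ===== LEMMAS AND PROOFS =====

-- a successful note-name lookup means the first char is no octave mark
theorem note_no_mark (c : Char) (pc : Int) (h : noteDict.get? c = some pc) :
    c ≠ '\'' ∧ c ≠ ',' := by
  constructor <;> rintro rfl <;>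
    rw [show noteDict.get? _ = none from by decide] at h <;> exact absurd h (by simp)

-- dropping a prefix containing no occurrences of a char preserves its count
theorem count_drop_prefix (p r : List Char) (ch : Char) (hp : p.count ch = 0)
    (hpre : p.isPrefixOf r) : (r.drop p.length).count ch = r.count ch := by
  rw [List.isPrefixOf_iff_prefix] at hpre
  obtain ⟨t, rfl⟩ := hpre
  simp [List.count_append, hp]

-- A's break-loop strips only accidental letters, so octave-mark counts are unchanged
theorem count_stripAccA (r : List Char) (ch : Char) (accs : List (List Char))
    (h : ∀ p ∈ accs, p.count ch = 0) : (stripAccA r accs).count ch = r.count ch := by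
  induction accs with
  | nil => rfl
  | cons acc accs ih =>
    unfold stripAccA
    split_ifs with ha
    · exact count_drop_prefix acc r ch (h acc (by simp)) ha
    · exact ih (fun p hp => h p (by simp [hp]))

theorem count_strip (r : List Char) (ch : Char) (h1 : ch ≠ 'i') (h2 : ch ≠ 's') (h3 : ch ≠ 'e') :
    (stripAccA r [['i','s','i','s'], ['e','s','e','s'], ['i','s'], ['e','s']]).count ch
      = r.count ch := by
  apply count_stripAccA
  intro p hp
  simp at hp
  rcases hp with rfl | rfl | rfl | rfl <;>
    simp [Ne.symm h1, Ne.symm h2, Ne.symm h3]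

-- ===== VERDICT (by name: the statement is the Claim_ definition above) =====
theorem parse_abs_pitch_py_spec : Claim_equal_parse_abs_pitch_py := by
  intro s _
  unfold Spec_parse_abs_pitch_py parse_abs_pitch_py parse_abs_pitch_py_alt
  cases hs : s.toList with
  | nil => rfl
  | cons c0 rest0 =>
    cases hg : noteDict.get? c0 with
    | none => simp [hg]
    | some pc =>
      obtain ⟨h1, h2⟩ := note_no_mark c0 pc hg
      simp [hg, count_strip rest0 '\'' (by decide) (by decide) (by decide),
        count_strip rest0 ',' (by decide) (by decide) (by decide),
        h1, h2]
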